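/- GENERATED by farm/mkstatement.py from design/units.tsv (unit `vorbis_decode_packet_rest.4a`) and the assertions of Vorbis/Spec/PacketRest4.lean — do not edit.
   THE STATEMENT of the proof unit `vorbis_decode_packet_rest.4a`: segment 4a of `vorbis_decode_packet_rest` (32 instructions; entries 0x110d0a;
   exits 0x110d0a,0x110d5c,0x110e7e; ranges 0x110d0a-0x110d56 + 0x110e31-0x110e56 + 0x110d06-0x110d06 + 0x110e74-0x110e79)
   takes each of its entry assertions to one of its exit assertions (`Vorbis.Spec.vorbis_decode_packet_rest.Seg4a`), given the contracts of its callees.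
   What the names mean: Vorbis/Spec/Basic.lean (the shared hypotheses), Vorbis/Spec/PacketRest4.lean (the assertions). The theorem to prove:
   `theorem vorbis_decode_packet_rest_4a_ok : Vorbis.Spec.vorbis_decode_packet_rest_4a.Statement`. -/
import Vorbis.Spec.PacketRest4
namespace Vorbis.Spec.vorbis_decode_packet_rest_4a
open X86 X86.User Asan

/-- The statement of unit `vorbis_decode_packet_rest.4a`. -/
def Statement : Prop :=
  ∀ (Lay : Layout) (_hLay : Lay.hi = 0x1000000) (μ : Microarch) (_hμ : UserX.MicroOK μ) (u₀ : State)
    (_hcode : HasCodeNat Lay u₀ Vorbis.L.vorbis_decode_packet_rest.entry Vorbis.Code.code_vorbis_decode_packet_rest.nat Vorbis.L.vorbis_decode_packet_rest.size)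
    (_h_asan_store2_noabort : Asan.SmallCheck Lay μ Vorbis.WayInv (Vorbis.CodeOK u₀) [.rax, .rcx, .rdx] 2 Vorbis.L.__asan_store2_noabort.entry)
    (_h_asan_load2_noabort : Asan.SmallCheck Lay μ Vorbis.WayInv (Vorbis.CodeOK u₀) [.rax, .rcx, .rdx] 2 Vorbis.L.__asan_load2_noabort.entry),
    Vorbis.Spec.vorbis_decode_packet_rest.Seg4a Lay μ u₀

end Vorbis.Spec.vorbis_decode_packet_rest_4a
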